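-- pv_equiv track=rewrite | github.com/fenre/splunk-monitoring-use-cases | scripts/generate_evidence_packs.py | _best_assurance
-- ===== SOURCE A (Python) =====
-- from typing import Any
--
-- _ASSURANCE_RANK = {"full": 3, "partial": 2, "contributing": 1}
--
-- def _best_assurance(entries: list[dict[str, Any]]) -> str:
--     """Pick the highest assurance across the entries for a clause."""
--     best = "contributing"
--     best_rank = 0
--     for entry in entries:
--         rank = _ASSURANCE_RANK.get(entry.get("assurance"), 0)
--         if rank > best_rank:
--             best_rank = rank
--             best = entry.get("assurance") or "contributing"
--     return best
-- ===== SOURCE B (Python) =====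
-- def _best_assurance(entries):
--     """Pick the highest assurance across the entries for a clause."""
--     present = {e.get("assurance") for e in entries}
--     for level in ("full", "partial", "contributing"):
--         if level in present:
--             return level
--     return "contributing"
-- ===== Notes on version B (the rewrite author's own statement) =====
-- stated objective: idiomatic
-- what changed: Replaces the running-max accumulator scan with a set of the assurance values present plus a first-match scan over the fixed priority tuple.
import Mathlib
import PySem

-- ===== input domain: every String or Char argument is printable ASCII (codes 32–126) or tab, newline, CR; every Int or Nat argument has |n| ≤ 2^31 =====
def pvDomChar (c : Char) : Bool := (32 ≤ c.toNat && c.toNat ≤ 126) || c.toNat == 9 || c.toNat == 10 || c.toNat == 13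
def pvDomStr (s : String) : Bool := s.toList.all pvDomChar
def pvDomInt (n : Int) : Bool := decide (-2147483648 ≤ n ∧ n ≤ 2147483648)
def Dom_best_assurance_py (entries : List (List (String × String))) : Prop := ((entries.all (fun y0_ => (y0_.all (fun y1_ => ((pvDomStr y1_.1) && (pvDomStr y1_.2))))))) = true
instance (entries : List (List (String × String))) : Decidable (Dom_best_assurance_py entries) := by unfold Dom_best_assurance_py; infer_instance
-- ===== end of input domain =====

-- B replaces A's running-max accumulator with a set of present assurance values
-- scanned against the fixed priority order (idiomatic decomposition; same cost).


-- ===== PORT A =====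
-- module constant _ASSURANCE_RANK
def ASSURANCE_RANK : PySem.Dict String Int := PySem.Dict.mk [("full", 3), ("partial", 2), ("contributing", 1)]

-- entry.get("assurance"): first-match lookup in the association list (dict convention)
def getAssurance (e : List (String × String)) : Option String := PySem.Dict.get? (PySem.Dict.mk e) "assurance"

-- _ASSURANCE_RANK.get(entry.get("assurance"), 0): the key may be None (missing), which hits the default
def rankOf (v : Option String) : Int :=
  match v with
  | none => 0
  | some s => PySem.Dict.getD ASSURANCE_RANK s 0

-- entry.get("assurance") or "contributing"  (falsy = missing key or empty string)
def orContributing (v : Option String) : String :=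
  match v with
  | none => "contributing"
  | some s => if s = "" then "contributing" else s

def best_assurance_py (entries : List (List (String × String))) : String :=
  (entries.foldl
    (fun (st : String × Int) entry =>
      let rank := rankOf (getAssurance entry)
      if rank > st.2 then (orContributing (getAssurance entry), rank)
      else st)
    ("contributing", 0)).1

-- ===== PORT B =====
def best_assurance_py_alt (entries : List (List (String × String))) : String :=
  let present : PySem.Set (Option String) :=
    PySem.Set.ofList (entries.map (fun e => getAssurance e))
  if PySem.Set.contains present (some "full") then "full"
  else if PySem.Set.contains present (some "partial") then "partial"
  else if PySem.Set.contains present (some "contributing") then "contributing"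
  else "contributing"

-- ===== PRECONDITION & SPEC =====
def Spec_best_assurance_py (entries : List (List (String × String))) (out : String) : Prop := out = best_assurance_py_alt entries
instance (entries : List (List (String × String))) (out : String) : Decidable (Spec_best_assurance_py entries out) := by unfold Spec_best_assurance_py; infer_instance

-- ===== CLAIM (what is proved, stated in full; the proofs are below) =====
def Claim_equal_best_assurance_py : Prop := ∀ (entries : List (List (String × String))), Dom_best_assurance_py entries → Spec_best_assurance_py entries (best_assurance_py entries)

-- ===== LEMMAS AND PROOFS =====

-- "some lvl appears among the entries' assurance values"
def hasLvl (lvl : String) (entries : List (List (String × String))) : Bool :=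
  entries.any (fun e => getAssurance e == some lvl)

theorem hasLvl_cons (lvl : String) (e : List (String × String))
    (es : List (List (String × String))) :
    hasLvl lvl (e :: es) = ((getAssurance e == some lvl) || hasLvl lvl es) := by
  simp [hasLvl]

theorem foldA_char (entries : List (List (String × String))) :
    ∀ (best : String) (r : Int), 0 ≤ r →
    (entries.foldl
      (fun (st : String × Int) entry =>
        let rank := rankOf (getAssurance entry)
        if rank > st.2 then (orContributing (getAssurance entry), rank)
        else st)
      (best, r)).1 =
    (if hasLvl "full" entries = true ∧ r < 3 then "full"
     else if hasLvl "partial" entries = true ∧ r < 2 then "partial"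
     else if hasLvl "contributing" entries = true ∧ r < 1 then "contributing"
     else best) := by
  induction entries with
  | nil => intro best r hr; simp [hasLvl]
  | cons e es ih =>
    intro best r hr
    simp only [List.foldl_cons, hasLvl_cons]
    cases hv : getAssurance e with
    | none =>
      have h0 : rankOf none = 0 := rfl
      simp only [h0]
      rw [if_neg (by omega), ih best r hr]
      simp
    | some s =>
      by_cases hf : s = "full"
      · subst hf
        have hrk : rankOf (some "full") = 3 := by decide
        simp only [hrk]
        by_cases h3 : (3 : Int) > r
        · rw [if_pos h3, ih _ 3 (by omega)]
          have h3' : r < 3 := h3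
          have hb : orContributing (some "full") = "full" := by decide
          simp [hb, h3']
        · rw [if_neg h3, ih best r hr]
          have h3' : ¬ r < 3 := h3
          simp [h3']
      · by_cases hp : s = "partial"
        · subst hp
          have hrk : rankOf (some "partial") = 2 := by decide
          simp only [hrk]
          by_cases h2 : (2 : Int) > r
          · rw [if_pos h2, ih _ 2 (by omega)]
            have h2' : r < 2 := h2
            have h3' : r < 3 := by omega
            have hb : orContributing (some "partial") = "partial" := by decide
            by_cases hFe : hasLvl "full" es = true <;> simp [hFe, hb, h2', h3']
          · rw [if_neg h2, ih best r hr]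
            have h2' : ¬ r < 2 := h2
            simp [h2']
        · by_cases hc : s = "contributing"
          · subst hc
            have hrk : rankOf (some "contributing") = 1 := by decide
            simp only [hrk]
            by_cases h1 : (1 : Int) > r
            · rw [if_pos h1, ih _ 1 (by omega)]
              have h1' : r < 1 := h1
              have h2' : r < 2 := by omega
              have h3' : r < 3 := by omega
              have hb : orContributing (some "contributing") = "contributing" := by decide
              by_cases hFe : hasLvl "full" es = true <;>
                by_cases hPe : hasLvl "partial" es = true <;>
                  simp [hFe, hPe, hb, h1', h2', h3']
            · rw [if_neg h1, ih best r hr]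
              have h1' : ¬ r < 1 := h1
              simp [h1']
          · -- some other string: rank 0, no update
            have bf : ("full" == s) = false := by simp [Ne.symm hf]
            have bp : ("partial" == s) = false := by simp [Ne.symm hp]
            have bc : ("contributing" == s) = false := by simp [Ne.symm hc]
            have h0 : rankOf (some s) = 0 := by
              simp [rankOf, ASSURANCE_RANK, PySem.Dict.getD, PySem.Dict.get?,
                List.find?, bf, bp, bc]
            simp only [h0]
            rw [if_neg (by omega), ih best r hr]
            have sf : (some s == some "full") = false := by simp [hf]
            have sp : (some s == some "partial") = false := by simp [hp]
            have sc : (some s == some "contributing") = false := by simp [hc]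
            simp [sf, sp, sc]

theorem present_contains (entries : List (List (String × String))) (lvl : String) :
    PySem.Set.contains
      (PySem.Set.ofList (entries.map (fun e => getAssurance e)))
      (some lvl) = hasLvl lvl entries := by
  simp only [hasLvl]
  rw [Bool.eq_iff_iff, PySem.Set.contains_iff]
  simp only [PySem.Set.mem_ofList, List.mem_map, List.any_eq_true, beq_iff_eq]

-- ===== VERDICT (by name: the statement is the Claim_ definition above) =====
theorem best_assurance_py_spec : Claim_equal_best_assurance_py := by
  intro entries _
  unfold Spec_best_assurance_py
  have halt : best_assurance_py_alt entries =
      (if PySem.Set.contains (PySem.Set.ofList (entries.map (fun e => getAssurance e)))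
            (some "full") then "full"
       else if PySem.Set.contains (PySem.Set.ofList (entries.map (fun e => getAssurance e)))
            (some "partial") then "partial"
       else if PySem.Set.contains (PySem.Set.ofList (entries.map (fun e => getAssurance e)))
            (some "contributing") then "contributing"
       else "contributing") := rfl
  unfold best_assurance_py
  rw [foldA_char entries "contributing" 0 (by omega), halt,
      present_contains entries "full", present_contains entries "partial",
      present_contains entries "contributing"]
  rcases hF : hasLvl "full" entries with _ | _ <;>
  rcases hP : hasLvl "partial" entries with _ | _ <;>
  rcases hC : hasLvl "contributing" entries with _ | _ <;> simp
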